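-- pv_equiv track=rewrite | github.com/hahooy/Python-Algo | findpivot.py | findPivotHelper
-- ===== SOURCE A (Python) =====
-- def findPivotHelper(a, lo, hi):
--     if lo == hi:
--         return a[lo]
--
--     mid1 = lo + (hi - lo) // 2
--     mid2 = mid1 + 1
--     if a[mid1] < a[mid2]:
--         return findPivotHelper(a, mid2, hi)
--     else:
--         return findPivotHelper(a, lo, mid1)
-- ===== SOURCE B (Python) =====
-- def findPivotHelper(a, lo, hi):
--     # track the remaining window by its LENGTH n (not the hi index);
--     # half the window each step, walking lo forward when ascending at the split
--     n = hi - lo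
--     while n:
--         half = n // 2
--         m = lo + half
--         if a[m] < a[m + 1]:
--             lo = m + 1
--             n -= half + 1
--         else:
--             n = half
--     return a[lo]
-- ===== Notes on version B (the rewrite author's own statement) =====
-- stated objective: alternative
-- what changed: Replaced the recursive lo/hi narrowing with an iterative loop whose state is (lo, remaining window LENGTH n): each step halves n and advances lo past the split when the array ascends there, then indexes the array once at the end.
-- outside the precondition, e.g. on findPivotHelper([3, 2, 1], 0, 3): A returns 3, B returns 3
import Mathlib
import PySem

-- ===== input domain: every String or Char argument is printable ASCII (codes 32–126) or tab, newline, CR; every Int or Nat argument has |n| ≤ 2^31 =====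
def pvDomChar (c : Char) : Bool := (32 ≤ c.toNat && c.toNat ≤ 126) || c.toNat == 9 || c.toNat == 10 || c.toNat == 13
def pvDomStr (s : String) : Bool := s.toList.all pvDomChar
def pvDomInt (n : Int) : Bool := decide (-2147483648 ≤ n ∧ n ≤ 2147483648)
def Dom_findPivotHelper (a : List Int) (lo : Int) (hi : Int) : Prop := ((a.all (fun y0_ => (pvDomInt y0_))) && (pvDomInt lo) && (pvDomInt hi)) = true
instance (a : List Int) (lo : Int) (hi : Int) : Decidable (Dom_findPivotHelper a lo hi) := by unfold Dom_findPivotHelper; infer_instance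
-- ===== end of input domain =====

-- B replaces A's recursive lo/hi narrowing with a loop over (lo, window length); return-value equivalence on -len a ≤ lo ≤ hi < len a.

-- ===== PORT A =====
-- fuel-based transliteration of A's recursion; (hi-lo).toNat + 1 fuel always
-- suffices on Pre_ since each call strictly shrinks hi - lo.
def findPivotHelperFuel (a : List Int) (lo : Int) (hi : Int) : Nat → Int
  | 0 => 0
  | n + 1 =>
    if lo = hi then (PySem.List.pyGet? a lo).getD 0
    else
      let mid1 := lo + PySem.Int.floordiv (hi - lo) 2
      let mid2 := mid1 + 1
      if (PySem.List.pyGet? a mid1).getD 0 < (PySem.List.pyGet? a mid2).getD 0 then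
        findPivotHelperFuel a mid2 hi n
      else
        findPivotHelperFuel a lo mid1 n

def findPivotHelper (a : List Int) (lo : Int) (hi : Int) : Int :=
  findPivotHelperFuel a lo hi ((hi - lo).toNat + 1)

-- ===== PORT B =====
-- the while-loop of Source B, structural recursion on the window length n;
-- returns the final value of lo.
def findPivotScan (a : List Int) : Nat → Int → Int
  | 0, lo => lo
  | k + 1, lo =>
    let half := (k + 1) / 2
    let m := lo + (half : Int)
    if (PySem.List.pyGet? a m).getD 0 < (PySem.List.pyGet? a (m + 1)).getD 0 then
      findPivotScan a (k - half) (m + 1)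
    else
      findPivotScan a half lo
decreasing_by all_goals omega

def findPivotHelper_alt (a : List Int) (lo : Int) (hi : Int) : Int :=
  (PySem.List.pyGet? a (findPivotScan a (hi - lo).toNat lo)).getD 0

-- ===== PRECONDITION & SPEC =====
-- Pre_ admits -len a ≤ lo ≤ hi < len a (Python indexing, including
-- negative-index wraparound). Outside it A raises (IndexError, or
-- RecursionError when lo > hi) except on out-of-range hi where, depending on
-- the element VALUES, the midpoints may happen to narrow the range before an
-- invalid index is touched — an accident of the data, not a specified corner.
def Pre_findPivotHelper (a : List Int) (lo : Int) (hi : Int) : Prop :=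
  -(a.length : Int) ≤ lo ∧ lo ≤ hi ∧ hi < a.length
instance (a : List Int) (lo : Int) (hi : Int) : Decidable (Pre_findPivotHelper a lo hi) := by unfold Pre_findPivotHelper; infer_instance

def pvWitness_findPivotHelper : List Int × Int × Int := ([1, 3, 2], 0, 2)

def Spec_findPivotHelper (a : List Int) (lo : Int) (hi : Int) (out : Int) : Prop := out = findPivotHelper_alt a lo hi
instance (a : List Int) (lo : Int) (hi : Int) (out : Int) : Decidable (Spec_findPivotHelper a lo hi out) := by unfold Spec_findPivotHelper; infer_instance

-- ===== CLAIM (what is proved, stated in full; the proofs are below) =====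
def Claim_equal_findPivotHelper : Prop := ∀ (a : List Int) (lo : Int) (hi : Int), Dom_findPivotHelper a lo hi → Pre_findPivotHelper a lo hi → Spec_findPivotHelper a lo hi (findPivotHelper a lo hi)

-- ===== LEMMAS AND PROOFS =====

-- core invariant: with enough fuel, A's recursion computes a[final lo] of B's loop
theorem fuel_eq_scan (a : List Int) :
    ∀ (m : Nat) (lo hi : Int), lo ≤ hi → (hi - lo).toNat ≤ m →
      findPivotHelperFuel a lo hi (m + 1)
        = (PySem.List.pyGet? a (findPivotScan a (hi - lo).toNat lo)).getD 0 := by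
  intro m
  induction m with
  | zero =>
    intro lo hi hle hfu
    have : lo = hi := by omega
    subst this
    simp [findPivotHelperFuel, findPivotScan]
  | succ m ih =>
    intro lo hi hle hfu
    by_cases h : lo = hi
    · subst h
      simp [findPivotHelperFuel, findPivotScan]
    · have hlt : lo < hi := lt_of_le_of_ne hle h
      obtain ⟨k, hk⟩ : ∃ k, (hi - lo).toNat = k + 1 := ⟨(hi - lo).toNat - 1, by omega⟩
      have hfd : PySem.Int.floordiv (hi - lo) 2 = (hi - lo) / 2 :=
        PySem.Int.floordiv_eq_ediv_of_pos (by omega)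
      have hcast : (((k + 1) / 2 : Nat) : Int) = (hi - lo) / 2 := by
        rw [Int.natCast_div]
        congr 1
        · omega
      rw [findPivotHelperFuel, hk, findPivotScan]
      simp only [if_neg h, hfd, hcast]
      have hb1 : 0 ≤ (hi - lo) / 2 := Int.ediv_nonneg (by omega) (by omega)
      have hb2 : (hi - lo) / 2 < hi - lo := by omega
      by_cases hc : (PySem.List.pyGet? a (lo + (hi - lo) / 2)).getD 0
          < (PySem.List.pyGet? a (lo + (hi - lo) / 2 + 1)).getD 0
      · rw [if_pos hc, if_pos hc]
        have h1 : (hi - (lo + (hi - lo) / 2 + 1)).toNat = k - (k + 1) / 2 := by omega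
        rw [← h1]
        exact ih _ _ (by omega) (by omega)
      · rw [if_neg hc, if_neg hc]
        have h1 : (lo + (hi - lo) / 2 - lo).toNat = (k + 1) / 2 := by omega
        rw [← h1]
        exact ih _ _ (by omega) (by omega)

-- ===== VERDICT (by name: the statement is the Claim_ definition above) =====
theorem findPivotHelper_spec : Claim_equal_findPivotHelper := by
  intro a lo hi _ hpre
  obtain ⟨h0, hle, hlen⟩ := hpre
  unfold Spec_findPivotHelper findPivotHelper findPivotHelper_alt
  exact fuel_eq_scan a _ lo hi hle (le_refl _)
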